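-- pv_equiv track=rewrite | github.com/5th-cirto/Free-Video-Install | api/services/subtitle_extractor.py | _pick_bilibili_subtitle_item
-- ===== SOURCE A (Python) =====
-- from typing import Any, Optional
--
-- def _pick_bilibili_subtitle_item(
--     items: list[dict[str, Any]], preferred_langs: list[str]
-- ) -> Optional[dict[str, Any]]:
--     # prefer exact language first
--     for lang in preferred_langs:
--         for item in items:
--             if str(item.get("lan") or "").lower() == lang.lower() and item.get("subtitle_url"):
--                 return item
--     # then prefer Chinese-like entries
--     for item in items:
--         lan = str(item.get("lan") or "").lower()
--         if ("zh" in lan or "ai-zh" == lan) and item.get("subtitle_url"):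
--             return item
--     # fallback first item with subtitle_url
--     return next((it for it in items if it.get("subtitle_url")), None)
-- ===== SOURCE B (Python) =====
-- from typing import Any, Optional
--
--
-- def _pick_bilibili_subtitle_item(
--     items: list[dict[str, Any]], preferred_langs: list[str]
-- ) -> Optional[dict[str, Any]]:
--     # One pass over items: index the first usable item per lowercased language,
--     # and remember the first Chinese-like and the first usable item overall.
--     by_lang: dict[str, dict[str, Any]] = {}
--     chinese: Optional[dict[str, Any]] = None
--     fallback: Optional[dict[str, Any]] = None
--     for item in items:
--         if not item.get("subtitle_url"):
--             continue
--         lan = str(item.get("lan") or "").lower()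
--         by_lang.setdefault(lan, item)
--         if chinese is None and ("zh" in lan or "ai-zh" == lan):
--             chinese = item
--         if fallback is None:
--             fallback = item
--     for lang in preferred_langs:
--         key = lang.lower()
--         if key in by_lang:
--             return by_lang[key]
--     return chinese if chinese is not None else fallback
-- ===== Notes on version B (the rewrite author's own statement) =====
-- stated objective: faster
-- what changed: Replaces A's nested preferred_langs x items scan (plus two extra item passes) by a single pass over items building a first-hit-per-lowercased-language dict while recording the first Chinese-like and first usable item, then O(1) dict lookups per preferred language.
import Mathlib
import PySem

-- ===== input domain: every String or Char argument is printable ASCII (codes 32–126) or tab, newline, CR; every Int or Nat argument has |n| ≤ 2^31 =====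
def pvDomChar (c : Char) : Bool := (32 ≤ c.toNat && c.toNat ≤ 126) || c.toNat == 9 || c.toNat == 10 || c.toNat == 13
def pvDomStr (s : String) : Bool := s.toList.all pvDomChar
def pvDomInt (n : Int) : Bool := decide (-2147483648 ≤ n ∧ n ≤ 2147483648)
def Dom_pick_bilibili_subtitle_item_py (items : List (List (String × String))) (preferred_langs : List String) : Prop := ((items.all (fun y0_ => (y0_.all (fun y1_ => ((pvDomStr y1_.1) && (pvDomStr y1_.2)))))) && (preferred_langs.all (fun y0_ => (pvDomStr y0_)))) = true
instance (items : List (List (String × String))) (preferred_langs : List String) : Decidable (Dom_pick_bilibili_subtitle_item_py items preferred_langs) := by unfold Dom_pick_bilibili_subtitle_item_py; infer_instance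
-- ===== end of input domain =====

-- B replaces A's nested preferred_langs × items scan by one pass over items building a
-- first-hit-per-language dict (plus first Chinese-like / first fallback), then lookups (idiomatic).

-- ===== PORT A =====
-- shared accessors, literal for both ports:
--   item.get(k)                       → pvGet
--   str(item.get("lan") or "").lower() → pvLan   (values are strings; 'x or ""' maps missing/"" to "")
--   bool(item.get("subtitle_url"))     → pvHasUrl (truthy ⟺ present and non-empty)
def pvGet (item : List (String × String)) (k : String) : Option String :=
  (PySem.Dict.mk item).get? k
def pvLan (item : List (String × String)) : String :=
  PySem.Str.lower ((pvGet item "lan").getD "")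
def pvHasUrl (item : List (String × String)) : Bool :=
  (pvGet item "subtitle_url").getD "" ≠ ""

-- inner loop of phase 1: first item whose lan matches `k` (already lowered) and has a url
def pvFindLangA (items : List (List (String × String))) (k : String) : Option (List (String × String)) :=
  match items with
  | [] => none
  | it :: rest => if pvLan it == k && pvHasUrl it then some it else pvFindLangA rest k

-- outer loop of phase 1 over preferred_langs
def pvPhase1A (items : List (List (String × String))) (langs : List String) : Option (List (String × String)) :=
  match langs with
  | [] => none
  | l :: ls =>
    match pvFindLangA items (PySem.Str.lower l) with
    | some it => some it
    | none => pvPhase1A items ls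

-- phase 2: first Chinese-like item with a url
def pvPhase2A (items : List (List (String × String))) : Option (List (String × String)) :=
  match items with
  | [] => none
  | it :: rest =>
    if (PySem.Str.isIn "zh" (pvLan it) || pvLan it == "ai-zh") && pvHasUrl it then some it
    else pvPhase2A rest

-- phase 3: fallback, first item with a url
def pvPhase3A (items : List (List (String × String))) : Option (List (String × String)) :=
  match items with
  | [] => none
  | it :: rest => if pvHasUrl it then some it else pvPhase3A rest

def pick_bilibili_subtitle_item_py (items : List (List (String × String))) (preferred_langs : List String) : Option (List (String × String)) :=
  match pvPhase1A items preferred_langs with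
  | some it => some it
  | none =>
    match pvPhase2A items with
    | some it => some it
    | none => pvPhase3A items

-- ===== PORT B =====
-- the single pass of Source B: state (by_lang, chinese, fallback)
def pvScanB (items : List (List (String × String)))
    (st : PySem.Dict String (List (String × String)) × Option (List (String × String)) × Option (List (String × String))) :
    PySem.Dict String (List (String × String)) × Option (List (String × String)) × Option (List (String × String)) :=
  match items with
  | [] => st
  | it :: rest =>
    pvScanB rest
      (if pvHasUrl it then
        let lan := pvLan it
        (st.1.setdefault lan it,
         (match st.2.1 with
          | some c => some c
          | none => if PySem.Str.isIn "zh" lan || lan == "ai-zh" then some it else none),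
         (match st.2.2 with
          | some f => some f
          | none => some it))
       else st)

-- the preferred_langs lookup loop of Source B
def pvLookupB (langs : List String) (d : PySem.Dict String (List (String × String))) : Option (List (String × String)) :=
  match langs with
  | [] => none
  | l :: ls =>
    let key := PySem.Str.lower l
    if d.contains key then d.get? key else pvLookupB ls d

def pick_bilibili_subtitle_item_py_alt (items : List (List (String × String))) (preferred_langs : List String) : Option (List (String × String)) :=
  let st := pvScanB items (PySem.Dict.empty, none, none)
  match pvLookupB preferred_langs st.1 with
  | some it => some it
  | none =>
    match st.2.1 with
    | some c => some c
    | none => st.2.2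

-- ===== PRECONDITION & SPEC =====
def Spec_pick_bilibili_subtitle_item_py (items : List (List (String × String))) (preferred_langs : List String) (out : Option (List (String × String))) : Prop := out = pick_bilibili_subtitle_item_py_alt items preferred_langs
instance (items : List (List (String × String))) (preferred_langs : List String) (out : Option (List (String × String))) : Decidable (Spec_pick_bilibili_subtitle_item_py items preferred_langs out) := by unfold Spec_pick_bilibili_subtitle_item_py; infer_instance

-- ===== CLAIM (what is proved, stated in full; the proofs are below) =====
def Claim_equal_pick_bilibili_subtitle_item_py : Prop := ∀ (items : List (List (String × String))) (preferred_langs : List String), Dom_pick_bilibili_subtitle_item_py items preferred_langs → Spec_pick_bilibili_subtitle_item_py items preferred_langs (pick_bilibili_subtitle_item_py items preferred_langs)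

-- ===== LEMMAS AND PROOFS =====

-- the dict built by the scan: first usable item per lowered language, on top of the initial dict
theorem pvScanB_get? (items : List (List (String × String))) (st) (k : String) :
    ((pvScanB items st).1).get? k = ((st.1.get? k).or (pvFindLangA items k)) := by
  induction items generalizing st with
  | nil => simp [pvScanB, pvFindLangA]
  | cons it rest ih =>
    simp only [pvScanB, pvFindLangA, ih]
    by_cases hu : pvHasUrl it
    · simp only [hu, if_true]
      by_cases hk : pvLan it = k
      · subst hk
        simp [PySem.Dict.get?_setdefault_self, Option.or]
        cases h : st.1.get? (pvLan it) <;> simp [Option.getD]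
      · rw [PySem.Dict.get?_setdefault_of_ne (hne := Ne.symm hk)]
        simp [beq_iff_eq, hk]
    · simp [hu]

theorem pvScanB_chinese (items : List (List (String × String))) (st) :
    (pvScanB items st).2.1 = (st.2.1.or (pvPhase2A items)) := by
  induction items generalizing st with
  | nil => simp [pvScanB, pvPhase2A]
  | cons it rest ih =>
    simp only [pvScanB, pvPhase2A, ih]
    by_cases hu : pvHasUrl it
    · simp only [hu, Bool.and_true, if_true]
      cases st.2.1 <;> by_cases hz : (PySem.Str.isIn "zh" (pvLan it) || pvLan it == "ai-zh") = true <;>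
        simp_all [Option.or]
    · simp [hu]

theorem pvScanB_fallback (items : List (List (String × String))) (st) :
    (pvScanB items st).2.2 = (st.2.2.or (pvPhase3A items)) := by
  induction items generalizing st with
  | nil => simp [pvScanB, pvPhase3A]
  | cons it rest ih =>
    simp only [pvScanB, pvPhase3A, ih]
    by_cases hu : pvHasUrl it
    · cases st.2.2 <;> simp [hu, Option.or]
    · simp [hu]

theorem pvLookupB_eq (langs : List String) (items : List (List (String × String))) :
    pvLookupB langs ((pvScanB items (PySem.Dict.empty, none, none)).1) = pvPhase1A items langs := by
  induction langs with
  | nil => simp [pvLookupB, pvPhase1A]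
  | cons l ls ih =>
    simp only [pvLookupB, pvPhase1A]
    rw [PySem.Dict.contains_eq_isSome_get?, pvScanB_get?, ih]
    simp only [PySem.Dict.get?_empty, Option.or]
    cases h : pvFindLangA items (PySem.Str.lower l) <;> simp_all

-- ===== VERDICT (by name: the statement is the Claim_ definition above) =====
theorem pick_bilibili_subtitle_item_py_spec : Claim_equal_pick_bilibili_subtitle_item_py := by
  intro items preferred_langs _
  unfold Spec_pick_bilibili_subtitle_item_py
  simp only [pick_bilibili_subtitle_item_py, pick_bilibili_subtitle_item_py_alt,
    pvLookupB_eq, pvScanB_chinese, pvScanB_fallback, Option.none_or]
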